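-- pv_equiv track=rewrite | github.com/Mukti-J/Encryption-Algorithm | Beaufort Cipher/VariantBeaufortGUI.py | variant_beaufort_cipher
-- ===== SOURCE A (Python) =====
-- def extend_key_repeat(text, key):
--     key = key.lower()
--     key_extended = ''
--     key_index = 0
--     for char in text:
--         if char.isalpha():
--             key_extended += key[key_index % len(key)]
--             key_index += 1
--         else:
--             key_extended += char
--     return key_extended
--
-- def extend_key_autokey(text, key):
--     key = key.lower()
--     key_extended = key
--     for char in text:
--         if len(key_extended) >= len([c for c in text if c.isalpha()]):
--             break
--         if char.isalpha():
--             key_extended += char.lower()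
--     result = ''
--     key_index = 0
--     for char in text:
--         if char.isalpha():
--             result += key_extended[key_index]
--             key_index += 1
--         else:
--             result += char
--     return result
--
-- def variant_beaufort_cipher(text, key, mode="Repeat"):
--     if mode == "Autokey":
--         key_extended = extend_key_autokey(text, key)
--     else:
--         key_extended = extend_key_repeat(text, key)
--     result = ''
--     for i, char in enumerate(text):
--         if char.isalpha():
--             k = ord(key_extended[i]) - ord('a')
--             if char.isupper():
--                 base = ord('A')
--                 c = (ord(char) - base - k + 26) % 26 + base
--                 result += chr(c)
--             else:
--                 base = ord('a')
--                 c = (ord(char) - base - k + 26) % 26 + base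
--                 result += chr(c)
--         else:
--             result += char
--     return result
-- ===== SOURCE B (Python) =====
-- def variant_beaufort_cipher(text, key, mode="Repeat"):
--     k = key.lower()
--     out = []
--     j = 0
--     seen = []  # lowercased plaintext alpha chars (autokey)
--     for ch in text:
--         if ch.isalpha():
--             if mode == "Autokey":
--                 seen.append(ch.lower())
--                 kc = k[j] if j < len(k) else seen[j - len(k)]
--             else:
--                 kc = k[j % len(k)]
--             base = ord('A') if ch.isupper() else ord('a')
--             out.append(chr((ord(ch) - base - (ord(kc) - ord('a')) + 26) % 26 + base))
--             j += 1
--         else: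
--             out.append(ch)
--     return ''.join(out)
-- ===== Notes on version B (the rewrite author's own statement) =====
-- stated objective: simpler
-- what changed: B drops A's two key-extension helpers and the text-length position-aligned key_extended string, doing a single pass over text that keeps an alpha counter j and (for autokey) the list of previously seen lowercased plaintext letters, computing each key character on the fly.
import Mathlib
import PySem

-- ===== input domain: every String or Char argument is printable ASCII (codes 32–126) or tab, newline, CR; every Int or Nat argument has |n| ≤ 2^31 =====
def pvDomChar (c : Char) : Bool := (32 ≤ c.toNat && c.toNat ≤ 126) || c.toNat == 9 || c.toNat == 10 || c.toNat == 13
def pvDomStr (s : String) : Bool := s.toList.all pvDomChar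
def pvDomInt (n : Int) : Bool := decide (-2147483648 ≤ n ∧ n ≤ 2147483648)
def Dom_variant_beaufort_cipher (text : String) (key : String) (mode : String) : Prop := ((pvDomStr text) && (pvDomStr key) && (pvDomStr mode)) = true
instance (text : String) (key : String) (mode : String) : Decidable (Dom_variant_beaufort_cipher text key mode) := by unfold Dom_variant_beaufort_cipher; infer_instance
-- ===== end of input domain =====

-- B replaces A's two key-extension helpers and the position-aligned key_extended string by a
-- single pass over text keeping an alpha counter and (for autokey) the seen plaintext alphas;
-- objective: simpler (one pass, no intermediate full-length key string).

-- the character arithmetic `(ord(char) - base - (ord(kc) - ord('a')) + 26) % 26 + base`,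
-- identical lines in both Python programs (ported once, used by both ports)
def pvEncChar (c : Char) (kc : Char) : Char :=
  let k : Int := (kc.toNat : Int) - 97
  if PySem.Chars.isupper c then
    Char.ofNat ((PySem.Int.mod ((c.toNat : Int) - 65 - k + 26) 26 + 65).toNat)
  else
    Char.ofNat ((PySem.Int.mod ((c.toNat : Int) - 97 - k + 26) 26 + 97).toNat)

-- ===== PORT A =====
-- extend_key_repeat's loop body; `key[key_index % len(key)]`: the index is nonnegative and,
-- under Pre_ (key nonempty when this line runs), in range, so getD is exact (len(key)=0, where
-- Python raises ZeroDivisionError, is excluded by Pre_)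
def pvEKRstep (k : List Char) (s : List Char × Nat) (c : Char) : List Char × Nat :=
  if PySem.Chars.isalpha c then (s.1 ++ [k.getD (s.2 % k.length) '?'], s.2 + 1)
  else (s.1 ++ [c], s.2)

def extend_key_repeat (text : String) (key : String) : List Char :=
  let k := PySem.Chars.lower key.toList
  (text.toList.foldl (pvEKRstep k) ([], 0)).1

-- extend_key_autokey's first loop (with its break) as structural recursion; Python recomputes
-- len([c for c in text if c.isalpha()]) each iteration — it is constant, passed in once
def pvAKBuild (alphaCount : Nat) : List Char → List Char → List Char
  | ext, [] => ext
  | ext, c :: rest =>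
    if alphaCount ≤ ext.length then ext
    else if PySem.Chars.isalpha c then pvAKBuild alphaCount (ext ++ [PySem.Chars.lowerChar c]) rest
    else pvAKBuild alphaCount ext rest

-- extend_key_autokey's second loop; key_extended[key_index] is always in range (Python never
-- raises here), so getD is exact
def pvAKAlignStep (ke : List Char) (s : List Char × Nat) (c : Char) : List Char × Nat :=
  if PySem.Chars.isalpha c then (s.1 ++ [ke.getD s.2 '?'], s.2 + 1)
  else (s.1 ++ [c], s.2)

def extend_key_autokey (text : String) (key : String) : List Char :=
  let k := PySem.Chars.lower key.toList
  let ke := pvAKBuild ((text.toList.filter PySem.Chars.isalpha).length) k text.toList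
  (text.toList.foldl (pvAKAlignStep ke) ([], 0)).1

-- the main `for i, char in enumerate(text)` loop body
def pvMainStep (ke : List Char) (res : List Char) (p : Int × Char) : List Char :=
  if PySem.Chars.isalpha p.2 then res ++ [pvEncChar p.2 (PySem.List.pyGetD ke p.1 '?')]
  else res ++ [p.2]

def variant_beaufort_cipher (text : String) (key : String) (mode : String) : String :=
  let ke := if mode = "Autokey" then extend_key_autokey text key else extend_key_repeat text key
  String.ofList ((PySem.List.enumerate text.toList).foldl (pvMainStep ke) [])

-- ===== PORT B =====
-- B's single loop body; state = (out, j, seen); `k[j]`/`seen[j-len(k)]`/`k[j % len(k)]` are in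
-- range whenever the Python B returns (empty key in repeat mode raises, excluded by Pre_)
def pvAltStep (kl : List Char) (autokey : Bool) (s : List Char × Nat × List Char) (c : Char) :
    List Char × Nat × List Char :=
  if PySem.Chars.isalpha c then
    let seen := if autokey then s.2.2 ++ [PySem.Chars.lowerChar c] else s.2.2
    let kc := if autokey then
        (if s.2.1 < kl.length then kl.getD s.2.1 '?' else seen.getD (s.2.1 - kl.length) '?')
      else kl.getD (s.2.1 % kl.length) '?'
    (s.1 ++ [pvEncChar c kc], s.2.1 + 1, seen)
  else (s.1 ++ [c], s.2.1, s.2.2)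

def variant_beaufort_cipher_alt (text : String) (key : String) (mode : String) : String :=
  let kl := PySem.Chars.lower key.toList
  String.ofList ((text.toList.foldl (pvAltStep kl (mode = "Autokey")) ([], 0, [])).1)

-- ===== PRECONDITION & SPEC =====
-- Pre_ excludes exactly the inputs where Python A raises: in repeat mode (mode ≠ "Autokey") an
-- empty key with at least one alphabetic character in text gives ZeroDivisionError
def Pre_variant_beaufort_cipher (text : String) (key : String) (mode : String) : Prop :=
  mode = "Autokey" ∨ key ≠ "" ∨ text.toList.all (fun c => !PySem.Chars.isalpha c) = true
instance (text : String) (key : String) (mode : String) : Decidable (Pre_variant_beaufort_cipher text key mode) := by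
  unfold Pre_variant_beaufort_cipher; infer_instance

def pvWitness_variant_beaufort_cipher : String × String × String := ("Hello, World!", "Key", "Repeat")

def Spec_variant_beaufort_cipher (text : String) (key : String) (mode : String) (out : String) : Prop := out = variant_beaufort_cipher_alt text key mode
instance (text : String) (key : String) (mode : String) (out : String) : Decidable (Spec_variant_beaufort_cipher text key mode out) := by unfold Spec_variant_beaufort_cipher; infer_instance

-- ===== CLAIM (what is proved, stated in full; the proofs are below) =====
def Claim_equal_variant_beaufort_cipher : Prop := ∀ (text : String) (key : String) (mode : String), Dom_variant_beaufort_cipher text key mode → Pre_variant_beaufort_cipher text key mode → Spec_variant_beaufort_cipher text key mode (variant_beaufort_cipher text key mode)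

-- ===== LEMMAS AND PROOFS =====

-- the key stream aligned with text positions (non-alpha chars kept), from a keystream g
def pvAstr (g : Nat → Char) : List Char → Nat → List Char
  | [], _ => []
  | c :: rest, j =>
    if PySem.Chars.isalpha c then g j :: pvAstr g rest (j + 1) else c :: pvAstr g rest j

-- the ciphertext produced from keystream g starting at alpha index j
def pvRef (g : Nat → Char) : List Char → Nat → List Char
  | [], _ => []
  | c :: rest, j =>
    if PySem.Chars.isalpha c then pvEncChar c (g j) :: pvRef g rest (j + 1) else c :: pvRef g rest j

def pvGR (kl : List Char) (j : Nat) : Char := kl.getD (j % kl.length) '?'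
def pvGA (kl alphas : List Char) (j : Nat) : Char :=
  if j < kl.length then kl.getD j '?' else alphas.getD (j - kl.length) '?'

theorem pvEKR_fold (kl : List Char) :
    ∀ (l ext : List Char) (ki : Nat),
      (l.foldl (pvEKRstep kl) (ext, ki)).1 = ext ++ pvAstr (pvGR kl) l ki := by
  intro l
  induction l with
  | nil => intro ext ki; simp [pvAstr]
  | cons c rest ih =>
    intro ext ki
    by_cases h : PySem.Chars.isalpha c = true <;>
      simp [List.foldl_cons, pvEKRstep, pvAstr, h, ih, pvGR]

theorem pvAKAlign_fold (ke : List Char) :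
    ∀ (l ext : List Char) (ki : Nat),
      (l.foldl (pvAKAlignStep ke) (ext, ki)).1 = ext ++ pvAstr (fun j => ke.getD j '?') l ki := by
  intro l
  induction l with
  | nil => intro ext ki; simp [pvAstr]
  | cons c rest ih =>
    intro ext ki
    by_cases h : PySem.Chars.isalpha c = true <;>
      simp [List.foldl_cons, pvAKAlignStep, pvAstr, h, ih]

theorem pvAKBuild_eq (n : Nat) :
    ∀ (l ext : List Char),
      pvAKBuild n ext l = ext ++ (PySem.Chars.lower (l.filter PySem.Chars.isalpha)).take (n - ext.length) := by
  intro l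
  induction l with
  | nil => intro ext; simp [pvAKBuild, PySem.Chars.lower]
  | cons c rest ih =>
    intro ext
    by_cases hb : n ≤ ext.length
    · simp [pvAKBuild, hb, Nat.sub_eq_zero_of_le hb]
    · by_cases h : PySem.Chars.isalpha c = true
      · have h1 : n - ext.length = (n - (ext.length + 1)) + 1 := by omega
        simp [pvAKBuild, hb, h, ih, PySem.Chars.lower, h1, List.take_succ_cons]
      · simp [pvAKBuild, hb, h, ih, PySem.Chars.lower]

theorem pvKE0_getD (kl alphas : List Char) (j : Nat) (hj : j < alphas.length) :
    (kl ++ alphas.take (alphas.length - kl.length)).getD j '?' = pvGA kl alphas j := by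
  unfold pvGA
  by_cases hlt : j < kl.length
  · rw [if_pos hlt, List.getD_append _ _ _ j hlt]
  · rw [Nat.not_lt] at hlt
    rw [if_neg (by omega), List.getD_append_right _ _ _ _ hlt]
    rw [List.getD_eq_getElem?_getD, List.getD_eq_getElem?_getD, List.getElem?_take,
      if_pos (by omega)]

theorem pvRef_congr (g h : Nat → Char) :
    ∀ (l : List Char) (j : Nat),
      (∀ p, j ≤ p → p < j + l.countP PySem.Chars.isalpha → g p = h p) →
      pvRef g l j = pvRef h l j := by
  intro l
  induction l with
  | nil => intro j h; rfl
  | cons c rest ih =>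
    intro j h
    by_cases hc : PySem.Chars.isalpha c = true
    · simp only [pvRef, hc, if_true]
      rw [h j le_rfl (by simp [List.countP_cons, hc]),
        ih (j + 1) (fun p hp1 hp2 => h p (by omega) (by simp [List.countP_cons, hc]; omega))]
    · simp only [pvRef, hc, if_false, Bool.false_eq_true]
      rw [ih j (fun p hp1 hp2 => h p hp1 (by simp [List.countP_cons, hc] at hp2 ⊢; omega))]

theorem pvMain_fold (g : Nat → Char) (ke : List Char) :
    ∀ (l : List Char) (s : Nat) (res : List Char) (j : Nat),
      ke.drop s = pvAstr g l j →
      (PySem.List.enumerate l (s : Int)).foldl (pvMainStep ke) res = res ++ pvRef g l j := by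
  intro l
  induction l with
  | nil => intro s res j h; simp [pvRef, PySem.List.enumerate_nil]
  | cons c rest ih =>
    intro s res j h
    rw [PySem.List.enumerate_cons, List.foldl_cons]
    have hcast : ((s : Int) + 1) = ((s + 1 : Nat) : Int) := by push_cast; ring
    by_cases hc : PySem.Chars.isalpha c = true
    · simp only [pvAstr, hc, if_true] at h
      have hget : ke[s]? = some (g j) := by
        have h0 : ke[s + 0]? = some (g j) := by
          rw [← List.getElem?_drop, h]; rfl
        simpa using h0
      have hdrop : ke.drop (s + 1) = pvAstr g rest (j + 1) := by
        rw [← List.drop_drop (i := 1) (j := s) (l := ke), h, List.drop_one, List.tail_cons]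
      have hstep : pvMainStep ke res ((s : Int), c) = res ++ [pvEncChar c (g j)] := by
        simp [pvMainStep, hc, PySem.List.pyGetD_natCast, List.getD_eq_getElem?_getD, hget]
      rw [hstep, hcast, ih (s + 1) _ (j + 1) hdrop]
      simp [pvRef, hc]
    · simp only [pvAstr, hc, if_false, Bool.false_eq_true] at h
      have hdrop : ke.drop (s + 1) = pvAstr g rest j := by
        rw [← List.drop_drop (i := 1) (j := s) (l := ke), h, List.drop_one, List.tail_cons]
      have hstep : pvMainStep ke res ((s : Int), c) = res ++ [c] := by
        simp [pvMainStep, hc]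
      rw [hstep, hcast, ih (s + 1) _ j hdrop]
      simp [pvRef, hc]

theorem pvAlt_fold_repeat (kl : List Char) :
    ∀ (l acc : List Char) (j : Nat) (seen : List Char),
      (l.foldl (pvAltStep kl false) (acc, j, seen)).1 = acc ++ pvRef (pvGR kl) l j := by
  intro l
  induction l with
  | nil => intro acc j seen; simp [pvRef]
  | cons c rest ih =>
    intro acc j seen
    by_cases hc : PySem.Chars.isalpha c = true <;>
      simp [List.foldl_cons, pvAltStep, pvRef, hc, ih, pvGR]

theorem pvAlt_fold_auto (kl alphas : List Char) :
    ∀ (l acc seen : List Char),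
      seen ++ PySem.Chars.lower (l.filter PySem.Chars.isalpha) = alphas →
      (l.foldl (pvAltStep kl true) (acc, seen.length, seen)).1 = acc ++ pvRef (pvGA kl alphas) l seen.length := by
  intro l
  induction l with
  | nil => intro acc seen h; simp [pvRef]
  | cons c rest ih =>
    intro acc seen h
    by_cases hc : PySem.Chars.isalpha c = true
    · have h' : (seen ++ [PySem.Chars.lowerChar c]) ++
          PySem.Chars.lower (rest.filter PySem.Chars.isalpha) = alphas := by
        rw [List.append_assoc]
        simpa [PySem.Chars.lower, hc] using h
      have hkc : (if seen.length < kl.length then kl.getD seen.length '?'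
          else (seen ++ [PySem.Chars.lowerChar c]).getD (seen.length - kl.length) '?')
          = pvGA kl alphas seen.length := by
        unfold pvGA
        by_cases hlt : seen.length < kl.length
        · simp [hlt]
        · rw [if_neg hlt, if_neg hlt, ← h']
          exact (List.getD_append _ _ _ _ (by simp)).symm
      have hlen : seen.length + 1 = (seen ++ [PySem.Chars.lowerChar c]).length := by simp
      rw [List.foldl_cons]
      simp only [pvAltStep, hc, if_true]
      rw [hkc]
      have hrec := ih (acc ++ [pvEncChar c (pvGA kl alphas seen.length)])
        (seen ++ [PySem.Chars.lowerChar c]) h'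
      simp only [← hlen] at hrec
      rw [hrec]
      simp [pvRef, hc]
    · have h' : seen ++ PySem.Chars.lower (rest.filter PySem.Chars.isalpha) = alphas := by
        simpa [PySem.Chars.lower, hc] using h
      rw [List.foldl_cons]
      simp only [pvAltStep, hc, if_false, Bool.false_eq_true]
      rw [ih (acc ++ [c]) seen h']
      simp [pvRef, hc]

-- ===== VERDICT (by name: the statement is the Claim_ definition above) =====
theorem variant_beaufort_cipher_spec : Claim_equal_variant_beaufort_cipher := by
  intro text key mode _ _
  unfold Spec_variant_beaufort_cipher
  by_cases hm : mode = "Autokey"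
  · -- Autokey mode
    have hn : (text.toList.filter PySem.Chars.isalpha).length
        = (PySem.Chars.lower (text.toList.filter PySem.Chars.isalpha)).length := by
      simp [PySem.Chars.lower]
    have hke : pvAKBuild (text.toList.filter PySem.Chars.isalpha).length
        (PySem.Chars.lower key.toList) text.toList
        = PySem.Chars.lower key.toList ++
          (PySem.Chars.lower (text.toList.filter PySem.Chars.isalpha)).take
            ((PySem.Chars.lower (text.toList.filter PySem.Chars.isalpha)).length
              - (PySem.Chars.lower key.toList).length) := by
      rw [pvAKBuild_eq, hn]
    have hext : extend_key_autokey text key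
        = pvAstr (fun j => (PySem.Chars.lower key.toList ++
            (PySem.Chars.lower (text.toList.filter PySem.Chars.isalpha)).take
              ((PySem.Chars.lower (text.toList.filter PySem.Chars.isalpha)).length
                - (PySem.Chars.lower key.toList).length)).getD j '?') text.toList 0 := by
      unfold extend_key_autokey
      simp only [← hke]
      simpa using pvAKAlign_fold _ text.toList [] 0
    have hA : variant_beaufort_cipher text key mode
        = String.ofList (pvRef (fun j => (PySem.Chars.lower key.toList ++
            (PySem.Chars.lower (text.toList.filter PySem.Chars.isalpha)).take
              ((PySem.Chars.lower (text.toList.filter PySem.Chars.isalpha)).length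
                - (PySem.Chars.lower key.toList).length)).getD j '?') text.toList 0) := by
      unfold variant_beaufort_cipher
      rw [if_pos hm]
      have h0 := pvMain_fold _ (extend_key_autokey text key) text.toList 0 [] 0
        (by rw [List.drop_zero, hext])
      simp only [Nat.cast_zero, List.nil_append] at h0
      exact congrArg String.ofList h0
    have hb : decide (mode = "Autokey") = true := by simp [hm]
    have hB : variant_beaufort_cipher_alt text key mode
        = String.ofList (pvRef (pvGA (PySem.Chars.lower key.toList)
            (PySem.Chars.lower (text.toList.filter PySem.Chars.isalpha))) text.toList 0) := by
      unfold variant_beaufort_cipher_alt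
      rw [hb]
      have h := pvAlt_fold_auto (PySem.Chars.lower key.toList)
        (PySem.Chars.lower (text.toList.filter PySem.Chars.isalpha)) text.toList [] []
        (by simp)
      simp only [List.length_nil, List.nil_append] at h
      exact congrArg String.ofList h
    rw [hA, hB]
    congr 1
    apply pvRef_congr
    intro p hp1 hp2
    have hp : p < (PySem.Chars.lower (text.toList.filter PySem.Chars.isalpha)).length := by
      rw [List.countP_eq_length_filter] at hp2
      omega
    exact pvKE0_getD _ _ p hp
  · -- Repeat mode
    have hext : extend_key_repeat text key
        = pvAstr (pvGR (PySem.Chars.lower key.toList)) text.toList 0 := by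
      unfold extend_key_repeat
      simpa using pvEKR_fold (PySem.Chars.lower key.toList) text.toList [] 0
    have hA : variant_beaufort_cipher text key mode
        = String.ofList (pvRef (pvGR (PySem.Chars.lower key.toList)) text.toList 0) := by
      unfold variant_beaufort_cipher
      rw [if_neg hm]
      have h0 := pvMain_fold _ (extend_key_repeat text key) text.toList 0 [] 0
        (by rw [List.drop_zero, hext])
      simp only [Nat.cast_zero, List.nil_append] at h0
      exact congrArg String.ofList h0
    have hb : decide (mode = "Autokey") = false := by simp [hm]
    have hB : variant_beaufort_cipher_alt text key mode
        = String.ofList (pvRef (pvGR (PySem.Chars.lower key.toList)) text.toList 0) := by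
      unfold variant_beaufort_cipher_alt
      rw [hb]
      have h := pvAlt_fold_repeat (PySem.Chars.lower key.toList) text.toList [] 0 []
      simp only [List.nil_append] at h
      exact congrArg String.ofList h
    rw [hA, hB]
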